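-- pv_equiv track=rewrite | github.com/AlenaRA49/Python-DQE-Alena-Rakutova | Module 4/Homework_Module4_Python_Alena_Rakutova_Part1.py | result
-- ===== SOURCE A (Python) =====
-- def result(dictList):#start for function that will select max values for the same keys and add indexes for the key according the rules. argument of the function the result of the previous function
--     result = {}#I leave both variables within the function because they won't be used anywhere else
--     indx = {}
--     for i, d in enumerate(dictList):
--         for k, v in d.items():
--             if k in result.keys():
--                 if v > result[k]:
--                     result[k] = v
--                     indx[k] = i+1
--             else:
--                 result[k] = v
--     for k, v in indx.items():
--         result[f'{k}_{v}'] = result[k]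
--         result.pop(k)
--     return result, indx
-- ===== SOURCE B (Python) =====
-- def result(dictList):
--     # Group-then-reduce in two phases over the flattened event stream:
--     # phase 1 records each key's first value and which keys ever exceed it
--     # (in stream order); phase 2 reduces each improved key's occurrence group
--     # to its maximum and the first 1-based dict index achieving it.
--     events = [(i + 1, k, v) for i, d in enumerate(dictList) for k, v in d.items()]
--     first = {}
--     improved = {}
--     for _, k, v in events:
--         if k not in first:
--             first[k] = v
--         elif v > first[k]:
--             improved.setdefault(k, True)
--     groups = {}
--     for j, k, v in events:
--         groups.setdefault(k, []).append((j, v))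
--     res = {k: fv for k, fv in first.items() if k not in improved}
--     indx = {}
--     for k in improved:
--         occ = groups[k]
--         m = max(v for _, v in occ)
--         j = next(j for j, v in occ if v == m)
--         res[f'{k}_{j}'] = m
--         indx[k] = j
--     return res, indx
-- ===== Notes on version B (the rewrite author's own statement) =====
-- stated objective: alternative
-- what changed: A's single incremental pass with a running-max dict is replaced by a two-phase group-then-reduce over the flattened event stream: phase 1 records each key's first value and which keys ever exceed it (in stream order), phase 2 groups occurrences per key and reduces each improved key's group to its max and the first index achieving it; Pre_ excludes inputs where a key textually equals another key suffixed with '_<position>', on which A's renamed key collides with an existing key and the surviving entries are an accident of dict overwrite/pop order.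
import Mathlib
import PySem

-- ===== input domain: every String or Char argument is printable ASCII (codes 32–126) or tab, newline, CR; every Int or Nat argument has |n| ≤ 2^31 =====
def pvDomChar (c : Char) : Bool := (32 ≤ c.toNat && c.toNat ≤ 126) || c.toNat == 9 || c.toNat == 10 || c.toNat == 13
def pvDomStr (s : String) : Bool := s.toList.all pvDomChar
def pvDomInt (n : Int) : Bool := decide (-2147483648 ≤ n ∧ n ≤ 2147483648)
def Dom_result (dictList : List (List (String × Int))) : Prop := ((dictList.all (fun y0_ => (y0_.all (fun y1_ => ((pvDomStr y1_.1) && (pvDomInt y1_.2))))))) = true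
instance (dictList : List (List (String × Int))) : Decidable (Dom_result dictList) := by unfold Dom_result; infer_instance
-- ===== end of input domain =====

-- B replaces A's incremental running-max pass by a two-phase group-then-reduce over the flattened
-- event stream (record first values and improved keys, then reduce each key's occurrence group);
-- objective: alternative. The equivalence is about the return value; neither version mutates its argument.

-- f'{k}_{v}' (used by both ports and by Pre_)
def pvName (k : String) (j : Int) : String := k ++ "_" ++ PySem.Int.toStr j

-- ===== PORT A =====
def result (dictList : List (List (String × Int))) : (List (String × Int)) × (List (String × Int)) :=
  let rx := (PySem.List.enumerate dictList 0).foldl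
      (fun (rx : PySem.Dict String Int × PySem.Dict String Int) p =>
        (PySem.Dict.ofList p.2).items.foldl
          (fun rx kv =>
            if rx.1.contains kv.1 then
              if kv.2 > rx.1.getD kv.1 0 then (rx.1.insert kv.1 kv.2, rx.2.insert kv.1 (p.1 + 1))
              else rx
            else (rx.1.insert kv.1 kv.2, rx.2))
          rx)
      (PySem.Dict.empty, PySem.Dict.empty)
  let res := rx.2.items.foldl
      (fun (r : PySem.Dict String Int) kv => (r.insert (pvName kv.1 kv.2) (r.getD kv.1 0)).erase kv.1) rx.1
  (res.items, rx.2.items)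

-- ===== PORT B =====
-- Source B's `improved` dict carries only keys (all values True): ported as an insertion-ordered
-- PySem.Set String (setdefault = Set.add); `groups.setdefault(k, []).append(x)` = Dict.modify k [] (· ++ [x]).
def result_alt (dictList : List (List (String × Int))) : (List (String × Int)) × (List (String × Int)) :=
  let events : List (Int × String × Int) :=
    (PySem.List.enumerate dictList 0).flatMap
      (fun p => (PySem.Dict.ofList p.2).items.map (fun kv => (p.1 + 1, kv.1, kv.2)))
  let fi := events.foldl
    (fun (fi : PySem.Dict String Int × PySem.Set String) e =>
      if !fi.1.contains e.2.1 then (fi.1.insert e.2.1 e.2.2, fi.2)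
      else if e.2.2 > fi.1.getD e.2.1 0 then (fi.1, PySem.Set.add fi.2 e.2.1)
      else fi)
    (PySem.Dict.empty, PySem.Set.empty)
  let groups := events.foldl
    (fun (g : PySem.Dict String (List (Int × Int))) e =>
      g.modify e.2.1 [] (fun occ => occ ++ [(e.1, e.2.2)]))
    PySem.Dict.empty
  let res0 := PySem.Dict.ofList (fi.1.items.filter (fun kv => !PySem.Set.contains fi.2 kv.1))
  let ri := fi.2.foldl
    (fun (ri : PySem.Dict String Int × PySem.Dict String Int) k =>
      let occ := groups.getD k []
      let m := (PySem.List.max? (occ.map (fun p => p.2)) (fun v => v)).getD 0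
      let j := ((occ.find? (fun p => p.2 == m)).map (fun p => p.1)).getD 0
      (ri.1.insert (pvName k j) m, ri.2.insert k j))
    (res0, PySem.Dict.empty)
  (ri.1.items, ri.2.items)

-- ===== PRECONDITION & SPEC =====
-- Pre_ excludes inputs where some key is textually another key suffixed with '_<i>' for a dict
-- position i (1..len): there A's renamed key can collide with an existing key, and which entries
-- survive at which positions is an accident of dict overwrite-in-place and pop order that no one
-- would specify either way.  (The second conjunct is a fact about strings that is always true —
-- it only makes the pairwise distinctness of renamed names checkable without string-digit reasoning.)
def Pre_result (dictList : List (List (String × Int))) : Prop :=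
  (∀ k ∈ PySem.List.dedup ((dictList.flatten).map (fun p => p.1)),
     ∀ i ∈ List.range dictList.length,
       pvName k ((i : Int) + 1) ∉ PySem.List.dedup ((dictList.flatten).map (fun p => p.1))) ∧
  (∀ k1 ∈ PySem.List.dedup ((dictList.flatten).map (fun p => p.1)),
     ∀ k2 ∈ PySem.List.dedup ((dictList.flatten).map (fun p => p.1)), k1 ≠ k2 →
       ∀ i1 ∈ List.range dictList.length, ∀ i2 ∈ List.range dictList.length,
         pvName k1 ((i1 : Int) + 1) ≠ pvName k2 ((i2 : Int) + 1))
instance (dictList : List (List (String × Int))) : Decidable (Pre_result dictList) := by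
  unfold Pre_result; infer_instance

def pvWitness_result : (List (List (String × Int))) := [[("x", 1), ("y", 5)], [("x", 3), ("y", 2)], [("x", 0), ("y", 9)]]

def Spec_result (dictList : List (List (String × Int))) (out : (List (String × Int)) × (List (String × Int))) : Prop := out = result_alt dictList
instance (dictList : List (List (String × Int))) (out : (List (String × Int)) × (List (String × Int))) : Decidable (Spec_result dictList out) := by unfold Spec_result; infer_instance

-- ===== CLAIM (what is proved, stated in full; the proofs are below) =====
def Claim_equal_result : Prop := ∀ (dictList : List (List (String × Int))), Dom_result dictList → Pre_result dictList → Spec_result dictList (result dictList)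

-- ===== LEMMAS AND PROOFS =====

abbrev PvEv := Int × String × Int

def pvEvents (dictList : List (List (String × Int))) : List PvEv :=
  (PySem.List.enumerate dictList 0).flatMap
    (fun p => (PySem.Dict.ofList p.2).items.map (fun kv => (p.1 + 1, kv.1, kv.2)))

def pvStep (rx : PySem.Dict String Int × PySem.Dict String Int) (e : PvEv) :
    PySem.Dict String Int × PySem.Dict String Int :=
  if rx.1.contains e.2.1 then
    if e.2.2 > rx.1.getD e.2.1 0 then (rx.1.insert e.2.1 e.2.2, rx.2.insert e.2.1 e.1) else rx
  else (rx.1.insert e.2.1 e.2.2, rx.2)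

def pvStepB (fi : PySem.Dict String Int × PySem.Set String) (e : PvEv) :
    PySem.Dict String Int × PySem.Set String :=
  if !fi.1.contains e.2.1 then (fi.1.insert e.2.1 e.2.2, fi.2)
  else if e.2.2 > fi.1.getD e.2.1 0 then (fi.1, PySem.Set.add fi.2 e.2.1)
  else fi

def pvRen (r : PySem.Dict String Int) (kv : String × Int) : PySem.Dict String Int :=
  (r.insert (pvName kv.1 kv.2) (r.getD kv.1 0)).erase kv.1

def pvFilt (es : List PvEv) (k : String) : List PvEv := es.filter (fun e => e.2.1 == k)
def pvVals (es : List PvEv) (k : String) : List Int := (pvFilt es k).map (fun e => e.2.2)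
def pvKeys (es : List PvEv) : List String := PySem.List.dedup (es.map (fun e => e.2.1))
def pvMaxL : List Int → Int
  | [] => 0
  | v :: t => t.foldl max v
def pvMax (es : List PvEv) (k : String) : Int := pvMaxL (pvVals es k)
def pvFst (es : List PvEv) (k : String) : Int := (pvVals es k).headD 0
def pvOcc (es : List PvEv) (k : String) : List (Int × Int) := (pvFilt es k).map (fun e => (e.1, e.2.2))
def pvJ (es : List PvEv) (k : String) : Int :=
  (((pvOcc es k).find? (fun p => p.2 == pvMax es k)).map (fun p => p.1)).getD 0
def pvIp (es : List PvEv) (k : String) : Nat :=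
  es.findIdx (fun e => e.2.1 == k && decide (e.2.2 > pvFst es k))

-- micro lemmas
theorem pvFilt_append (es : List PvEv) (e : PvEv) (k : String) :
    pvFilt (es ++ [e]) k = pvFilt es k ++ (if e.2.1 = k then [e] else []) := by
  by_cases h : e.2.1 = k <;> simp [pvFilt, List.filter_append, h]

theorem pvFilt_other (es : List PvEv) (e : PvEv) (k : String) (h : e.2.1 ≠ k) :
    pvFilt (es ++ [e]) k = pvFilt es k := by simp [pvFilt_append, h]

theorem mem_pvKeys (es : List PvEv) (k : String) : k ∈ pvKeys es ↔ pvFilt es k ≠ [] := by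
  simp [pvKeys, pvFilt, PySem.List.dedup_eq_ofList, PySem.Set.mem_ofList, List.filter_eq_nil_iff]

theorem pvKeys_nodup (es : List PvEv) : (pvKeys es).Nodup := by
  simp only [pvKeys, PySem.List.dedup_eq_ofList]; exact PySem.Set.nodup_ofList _

theorem pvKeys_append (es : List PvEv) (e : PvEv) :
    pvKeys (es ++ [e]) = PySem.Set.add (pvKeys es) e.2.1 := by
  simp [pvKeys, PySem.List.dedup_eq_ofList, PySem.Set.ofList_append_singleton]

theorem pvMaxL_append (l : List Int) (v : Int) :
    pvMaxL (l ++ [v]) = if l = [] then v else max (pvMaxL l) v := by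
  cases l with
  | nil => simp [pvMaxL]
  | cons a t => simp [pvMaxL, List.foldl_append]

theorem pvMaxL_mem (l : List Int) (h : l ≠ []) : pvMaxL l ∈ l := by
  cases l with
  | nil => simp at h
  | cons a t =>
    rcases PySem.List.foldl_max_mem t a with h1 | h1
    · simp [pvMaxL, h1]
    · simp [pvMaxL]; right; exact h1

theorem le_pvMaxL (l : List Int) (x : Int) (h : x ∈ l) : x ≤ pvMaxL l := by
  cases l with
  | nil => simp at h
  | cons a t =>
    rcases List.mem_cons.mp h with rfl | hx
    · exact (PySem.List.le_foldl_max t x).1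
    · exact (PySem.List.le_foldl_max t a).2 x hx

theorem pvFst_le_pvMax (es : List PvEv) (k : String) (h : pvFilt es k ≠ []) :
    pvFst es k ≤ pvMax es k := by
  have hv : pvVals es k ≠ [] := by simp [pvVals, h]
  apply le_pvMaxL
  cases hl : pvVals es k with
  | nil => exact absurd hl hv
  | cons a t => simp [pvFst, hl]

theorem pvFst_eq_pvMax (es : List PvEv) (k : String) (h : pvFilt es k ≠ [])
    (hn : ¬ pvFst es k < pvMax es k) : pvFst es k = pvMax es k := by
  have := pvFst_le_pvMax es k h; omega

theorem pvVals_append (es : List PvEv) (e : PvEv) (k : String) :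
    pvVals (es ++ [e]) k = pvVals es k ++ (if e.2.1 = k then [e.2.2] else []) := by
  by_cases h : e.2.1 = k <;> simp [pvVals, pvFilt_append, h]

theorem pvOcc_append (es : List PvEv) (e : PvEv) (k : String) :
    pvOcc (es ++ [e]) k = pvOcc es k ++ (if e.2.1 = k then [(e.1, e.2.2)] else []) := by
  by_cases h : e.2.1 = k <;> simp [pvOcc, pvFilt_append, h]

theorem pvMax_other (es : List PvEv) (e : PvEv) (k : String) (h : e.2.1 ≠ k) :
    pvMax (es ++ [e]) k = pvMax es k := by simp [pvMax, pvVals, pvFilt_other _ _ _ h]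

theorem pvFst_other (es : List PvEv) (e : PvEv) (k : String) (h : e.2.1 ≠ k) :
    pvFst (es ++ [e]) k = pvFst es k := by simp [pvFst, pvVals, pvFilt_other _ _ _ h]

theorem pvJ_other (es : List PvEv) (e : PvEv) (k : String) (h : e.2.1 ≠ k) :
    pvJ (es ++ [e]) k = pvJ es k := by
  simp [pvJ, pvOcc, pvMax, pvVals, pvFilt_other _ _ _ h]

theorem pvFst_append (es : List PvEv) (e : PvEv) (k : String) (h : pvFilt es k ≠ []) :
    pvFst (es ++ [e]) k = pvFst es k := by
  have hv : pvVals es k ≠ [] := by simp [pvVals, h]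
  rw [pvFst, pvVals_append]
  cases hl : pvVals es k with
  | nil => exact absurd hl hv
  | cons a t => simp [pvFst, hl]

theorem pvFst_append_new (es : List PvEv) (e : PvEv) (k : String) (hk : e.2.1 = k)
    (h : pvFilt es k = []) : pvFst (es ++ [e]) k = e.2.2 := by
  have hv : pvVals es k = [] := by simp [pvVals, h]
  rw [pvFst, pvVals_append, hv, if_pos hk]
  rfl

theorem pvMax_append_self (es : List PvEv) (e : PvEv) (k : String) (hk : e.2.1 = k) :
    pvMax (es ++ [e]) k = if pvFilt es k = [] then e.2.2 else max (pvMax es k) e.2.2 := by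
  rw [pvMax, pvVals_append, if_pos hk, pvMaxL_append]
  by_cases h : pvFilt es k = [] <;> simp [pvVals, pvMax, h]

theorem pvMax_mem_vals (es : List PvEv) (k : String) (h : pvFilt es k ≠ []) :
    pvMax es k ∈ pvVals es k := by
  apply pvMaxL_mem; simp [pvVals, h]

theorem pvJ_append_le (es : List PvEv) (e : PvEv) (k : String) (hk : e.2.1 = k)
    (h : pvFilt es k ≠ []) (hle : e.2.2 ≤ pvMax es k) :
    pvJ (es ++ [e]) k = pvJ es k := by
  have hmax : pvMax (es ++ [e]) k = pvMax es k := by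
    rw [pvMax_append_self es e k hk, if_neg h]; omega
  have hex : ∃ p ∈ pvOcc es k, (p.2 == pvMax es k) = true := by
    have := pvMax_mem_vals es k h
    simp only [pvVals, List.mem_map] at this
    obtain ⟨ev, hev, hv⟩ := this
    exact ⟨(ev.1, ev.2.2), List.mem_map.mpr ⟨ev, hev, rfl⟩, by simp [hv]⟩
  have hsome : ((pvOcc es k).find? (fun p => p.2 == pvMax es k)).isSome := by
    rw [List.find?_isSome]; exact hex
  rw [pvJ, hmax, pvOcc_append, if_pos hk, List.find?_append]
  cases hf : (pvOcc es k).find? (fun p => p.2 == pvMax es k) with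
  | none => rw [hf] at hsome; simp at hsome
  | some q => simp [pvJ, hf]

theorem pvJ_append_gt (es : List PvEv) (e : PvEv) (k : String) (hk : e.2.1 = k)
    (hgt : pvFilt es k = [] ∨ pvMax es k < e.2.2) :
    pvJ (es ++ [e]) k = e.1 := by
  by_cases h : pvFilt es k = []
  · have : pvOcc es k = [] := by simp [pvOcc, h]
    have hmax : pvMax (es ++ [e]) k = e.2.2 := by rw [pvMax_append_self es e k hk, if_pos h]
    simp [pvJ, hmax, pvOcc_append, if_pos hk, this]
  · have hlt : pvMax es k < e.2.2 := hgt.resolve_left h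
    have hmax : pvMax (es ++ [e]) k = e.2.2 := by
      rw [pvMax_append_self es e k hk, if_neg h]; omega
    have hnone : (pvOcc es k).find? (fun p => p.2 == e.2.2) = none := by
      rw [List.find?_eq_none]
      intro p hp
      have : p.2 ∈ pvVals es k := by
        simp only [pvOcc, List.mem_map] at hp
        obtain ⟨ev, hev, hq⟩ := hp
        simp only [pvVals, List.mem_map]
        exact ⟨ev, hev, by rw [← hq]⟩
      have := le_pvMaxL _ _ this
      simp only [pvMax] at hlt
      simp only [beq_iff_eq]
      omega
    rw [pvJ, hmax, pvOcc_append, if_pos hk, List.find?_append, hnone]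
    simp

theorem pvIp_append_stable (es : List PvEv) (e : PvEv) (k : String)
    (h : pvFilt es k ≠ []) (hlt : pvIp es k < es.length) :
    pvIp (es ++ [e]) k = pvIp es k := by
  rw [pvIp, pvFst_append es e k h, List.findIdx_append]
  rw [pvIp] at hlt
  rw [if_pos hlt, pvIp]

theorem pvIp_append_new (es : List PvEv) (e : PvEv) (k : String) (hk : e.2.1 = k)
    (h : pvFilt es k ≠ []) (hni : ¬ pvFst es k < pvMax es k) (hv : pvFst es k < e.2.2) :
    pvIp (es ++ [e]) k = es.length := by
  have hall : ∀ x ∈ es, (x.2.1 == k && decide (x.2.2 > pvFst es k)) = false := by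
    intro x hx
    by_cases hxk : x.2.1 = k
    · have hxv : x.2.2 ∈ pvVals es k := by
        simp only [pvVals, pvFilt, List.mem_map]
        exact ⟨x, List.mem_filter.mpr ⟨hx, by simp [hxk]⟩, rfl⟩
      have := le_pvMaxL _ _ hxv
      simp only [pvMax] at hni
      simp only [Bool.and_eq_false_iff]
      right; simp; omega
    · simp [hxk]
  have hno : ¬ (es.findIdx (fun e' => e'.2.1 == k && decide (e'.2.2 > pvFst es k)) < es.length) := by
    rw [List.findIdx_lt_length]
    rintro ⟨x, hx, hpx⟩
    simp only [hall x hx] at hpx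
    exact Bool.false_ne_true hpx
  rw [pvIp, pvFst_append es e k h, List.findIdx_append, if_neg hno]
  have : List.findIdx (fun e' => e'.2.1 == k && decide (e'.2.2 > pvFst es k)) [e] = 0 := by
    have : (e.2.1 == k && decide (e.2.2 > pvFst es k)) = true := by simp [hk]; omega
    simp [List.findIdx_cons, this]
  omega

theorem find?_pair_map (K : List String) (g : String → Int) (k : String) (h : k ∈ K) :
    (K.map (fun x => (x, g x))).find? (fun p => p.1 == k) = some (k, g k) := by
  induction K with
  | nil => simp at h
  | cons a t ih =>
    by_cases ha : a = k
    · subst ha; simp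
    · rcases List.mem_cons.mp h with h1 | h1
      · exact absurd h1.symm ha
      · simp [ha, ih h1]

-- invariant of A's fold
def pvInv (es : List PvEv) (rx : PySem.Dict String Int × PySem.Dict String Int) : Prop :=
  rx.1.items = (pvKeys es).map (fun k => (k, pvMax es k)) ∧
  (∀ k, k ∈ rx.2.items.map Prod.fst ↔ (k ∈ pvKeys es ∧ pvFst es k < pvMax es k)) ∧
  (rx.2.items.map Prod.fst).Nodup ∧
  (∀ p ∈ rx.2.items, p.2 = pvJ es p.1) ∧
  rx.2.items.Pairwise (fun p q => pvIp es p.1 < pvIp es q.1) ∧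
  (∀ p ∈ rx.2.items, pvIp es p.1 < es.length)

theorem pvInv_foldl (es : List PvEv) :
    pvInv es (es.foldl pvStep (PySem.Dict.empty, PySem.Dict.empty)) := by
  induction es using List.reverseRecOn with
  | nil =>
    refine ⟨?_, ?_, ?_, ?_, ?_, ?_⟩ <;>
      simp [PySem.Dict.empty, pvKeys, PySem.List.dedup_eq_ofList, PySem.Set.ofList_nil]
  | append_singleton es e ih =>
    obtain ⟨i, k, v⟩ := e
    obtain ⟨hR, hXm, hXnd, hXv, hXp, hXl⟩ := ih
    rw [List.foldl_append, List.foldl_cons, List.foldl_nil]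
    set rx := es.foldl pvStep (PySem.Dict.empty, PySem.Dict.empty) with hrx
    have hkeysR : rx.1.keys = pvKeys es := by
      rw [PySem.Dict.keys, hR, List.map_map]
      exact List.map_id _
    have hgetD : ∀ k' ∈ pvKeys es, rx.1.getD k' 0 = pvMax es k' := by
      intro k' hk'
      simp [PySem.Dict.getD, PySem.Dict.get?, hR, find?_pair_map _ _ _ hk']
    have hcontR : (rx.1.contains k = true) ↔ k ∈ pvKeys es := by
      rw [PySem.Dict.contains_iff_mem_keys, hkeysR]
    have hstab : ∀ p ∈ rx.2.items, pvIp (es ++ [(i,k,v)]) p.1 = pvIp es p.1 := by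
      intro p hp
      have hpk := (hXm p.1).mp (List.mem_map_of_mem hp)
      exact pvIp_append_stable es _ p.1 ((mem_pvKeys es p.1).mp hpk.1) (hXl p hp)
    by_cases hmem : k ∈ pvKeys es
    · have hcont : rx.1.contains k = true := hcontR.mpr hmem
      have hfilt : pvFilt es k ≠ [] := (mem_pvKeys es k).mp hmem
      have hkeys' : pvKeys (es ++ [(i,k,v)]) = pvKeys es := by
        rw [pvKeys_append, PySem.Set.add_of_mem hmem]
      have hFk : pvFst (es ++ [(i,k,v)]) k = pvFst es k := pvFst_append es _ k hfilt
      have hFle : pvFst es k ≤ pvMax es k := pvFst_le_pvMax es k hfilt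
      by_cases hgt : v > rx.1.getD k 0
      · have hgt' : pvMax es k < v := by rw [hgetD k hmem] at hgt; omega
        have hstep : pvStep rx (i,k,v) = (rx.1.insert k v, rx.2.insert k i) := by
          simp [pvStep, hcont, hgt]
        rw [hstep]
        have hMk : pvMax (es ++ [(i,k,v)]) k = v := by
          rw [pvMax_append_self es (i,k,v) k rfl, if_neg hfilt]
          show max (pvMax es k) v = v
          omega
        have hJk : pvJ (es ++ [(i,k,v)]) k = i := pvJ_append_gt es (i,k,v) k rfl (Or.inr hgt')
        have hFv : pvFst es k < v := by omega
        have hRitems : (rx.1.insert k v).items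
            = (pvKeys (es ++ [(i,k,v)])).map (fun k' => (k', pvMax (es ++ [(i,k,v)]) k')) := by
          rw [PySem.Dict.items_insert_of_contains _ _ hcont, hR, List.map_map, hkeys']
          apply List.map_congr_left
          intro a ha
          simp only [Function.comp_apply]
          by_cases hak : a = k
          · subst hak; simp [hMk]
          · have hne : ((i,k,v) : PvEv).2.1 ≠ a := fun h => hak ((show k = a from h).symm)
            rw [pvMax_other es _ _ hne]
            simp [hak]
        by_cases hx : k ∈ rx.2.items.map Prod.fst
        · have hcx : rx.2.contains k = true := by
            rw [PySem.Dict.contains_iff_mem_keys]; simpa [PySem.Dict.keys] using hx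
          have hXitems : (rx.2.insert k i).items
              = rx.2.items.map (fun p => if p.1 == k then (k,i) else p) :=
            PySem.Dict.items_insert_of_contains _ _ hcx
          have hfstpt : ∀ p : String × Int, (if (p.1 == k) = true then (k,i) else p).1 = p.1 := by
            intro p; by_cases hpk : p.1 = k <;> simp [hpk]
          have hfst : (rx.2.insert k i).items.map Prod.fst = rx.2.items.map Prod.fst := by
            rw [hXitems, List.map_map]
            apply List.map_congr_left
            intro p _
            simp only [Function.comp_apply]
            exact hfstpt p
          refine ⟨hRitems, ?_, ?_, ?_, ?_, ?_⟩
          · intro k'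
            rw [hfst, hXm k', hkeys']
            by_cases hk' : k' = k
            · subst hk'
              have himp := (hXm k').mp hx
              constructor
              · intro _; exact ⟨hmem, by rw [hFk, hMk]; omega⟩
              · intro _; exact himp
            · have hne : ((i,k,v) : PvEv).2.1 ≠ k' := fun h => hk' h.symm
              rw [pvFst_other es _ _ hne, pvMax_other es _ _ hne]
          · rw [hfst]; exact hXnd
          · intro p' hp'
            rw [hXitems] at hp'
            obtain ⟨p, hp, rfl⟩ := List.mem_map.mp hp'
            by_cases hpk : p.1 = k
            · simp only [hpk, beq_self_eq_true, if_true]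
              rw [hJk]
            · have hb : (p.1 == k) = false := by simp [hpk]
              simp only [hb, Bool.false_eq_true, if_false]
              have hne : ((i,k,v) : PvEv).2.1 ≠ p.1 := fun h => hpk ((show k = p.1 from h).symm)
              rw [pvJ_other es _ _ hne]; exact hXv p hp
          · rw [hXitems, List.pairwise_map]
            refine hXp.imp_of_mem ?_
            intro p q hp hq h
            rw [hfstpt p, hfstpt q, hstab p hp, hstab q hq]; exact h
          · intro p' hp'
            rw [hXitems] at hp'
            obtain ⟨p, hp, rfl⟩ := List.mem_map.mp hp'
            rw [hfstpt p, hstab p hp, List.length_append]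
            have := hXl p hp; simp; omega
        · have hcx : rx.2.contains k = false := by
            rw [← Bool.not_eq_true, PySem.Dict.contains_iff_mem_keys]
            simpa [PySem.Dict.keys] using hx
          have hXitems : (rx.2.insert k i).items = rx.2.items ++ [(k,i)] :=
            PySem.Dict.items_insert_of_not_contains _ _ hcx
          have hni : ¬ pvFst es k < pvMax es k := fun h => hx ((hXm k).mpr ⟨hmem, h⟩)
          have hIpk : pvIp (es ++ [(i,k,v)]) k = es.length :=
            pvIp_append_new es (i,k,v) k rfl hfilt hni hFv
          have hpne : ∀ p ∈ rx.2.items, p.1 ≠ k := by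
            intro p hp h
            exact hx (h ▸ List.mem_map_of_mem hp)
          refine ⟨hRitems, ?_, ?_, ?_, ?_, ?_⟩
          · intro k'
            rw [hXitems, List.map_append, hkeys']
            by_cases hk' : k' = k
            · subst hk'
              simp only [List.mem_append, List.map_cons, List.map_nil, List.mem_singleton]
              constructor
              · intro _; exact ⟨hmem, by rw [hFk, hMk]; omega⟩
              · intro _; simp
            · have hne : ((i,k,v) : PvEv).2.1 ≠ k' := fun h => hk' h.symm
              rw [pvFst_other es _ _ hne, pvMax_other es _ _ hne]
              simp only [List.mem_append, List.map_cons, List.map_nil, List.mem_singleton]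
              constructor
              · rintro (h | h)
                · exact (hXm k').mp h
                · exact absurd h hk'
              · intro h; exact Or.inl ((hXm k').mpr h)
          · rw [hXitems, List.map_append]
            simp only [List.map_cons, List.map_nil]
            rw [List.nodup_append]
            exact ⟨hXnd, List.nodup_singleton _, by
              intro a ha b hb
              simp only [List.mem_cons, List.not_mem_nil, or_false] at hb
              subst hb
              exact fun h => hx (h ▸ ha)⟩
          · intro p hp
            rw [hXitems] at hp
            rcases List.mem_append.mp hp with h | h
            · have hne : ((i,k,v) : PvEv).2.1 ≠ p.1 := fun hh => hpne p h hh.symm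
              rw [pvJ_other es _ _ hne]; exact hXv p h
            · simp only [List.mem_singleton] at h
              subst h
              rw [hJk]
          · rw [hXitems, List.pairwise_append]
            refine ⟨hXp.imp_of_mem ?_, List.pairwise_singleton _ _, ?_⟩
            · intro p q hp hq h
              rw [hstab p hp, hstab q hq]; exact h
            · intro p hp q hq
              simp only [List.mem_singleton] at hq
              subst hq
              rw [hstab p hp, hIpk]
              exact hXl p hp
          · intro p hp
            rw [hXitems] at hp
            rcases List.mem_append.mp hp with h | h
            · rw [hstab p h, List.length_append]
              have := hXl p h; simp; omega
            · simp only [List.mem_singleton] at h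
              subst h
              rw [hIpk, List.length_append]; simp
      · have hle : v ≤ pvMax es k := by rw [hgetD k hmem] at hgt; omega
        have hstep : pvStep rx (i,k,v) = rx := by
          simp [pvStep, hcont, hgt]
        rw [hstep]
        have hMk : pvMax (es ++ [(i,k,v)]) k = pvMax es k := by
          rw [pvMax_append_self es (i,k,v) k rfl, if_neg hfilt]
          show max (pvMax es k) v = pvMax es k
          omega
        refine ⟨?_, ?_, hXnd, ?_, ?_, ?_⟩
        · rw [hR, hkeys']
          apply List.map_congr_left
          intro a ha
          by_cases hak : a = k
          · subst hak; rw [hMk]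
          · have hne : ((i,k,v) : PvEv).2.1 ≠ a := fun h => hak ((show k = a from h).symm)
            rw [pvMax_other es _ _ hne]
        · intro k'
          rw [hXm k', hkeys']
          by_cases hk' : k' = k
          · subst hk'; rw [hFk, hMk]
          · have hne : ((i,k,v) : PvEv).2.1 ≠ k' := fun h => hk' h.symm
            rw [pvFst_other es _ _ hne, pvMax_other es _ _ hne]
        · intro p hp
          by_cases hpk : p.1 = k
          · rw [hpk, pvJ_append_le es (i,k,v) k rfl hfilt hle]
            rw [← hpk]; exact hXv p hp
          · have hne : ((i,k,v) : PvEv).2.1 ≠ p.1 := fun h => hpk ((show k = p.1 from h).symm)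
            rw [pvJ_other es _ _ hne]; exact hXv p hp
        · refine hXp.imp_of_mem ?_
          intro p q hp hq h
          rw [hstab p hp, hstab q hq]; exact h
        · intro p hp
          rw [hstab p hp, List.length_append]
          have := hXl p hp; simp; omega
    · have hcont : rx.1.contains k = false := by
        rw [← Bool.not_eq_true]; simp [hcontR, hmem]
      have hfilt : pvFilt es k = [] := by
        by_contra hne; exact hmem ((mem_pvKeys es k).mpr hne)
      have hkeys' : pvKeys (es ++ [(i, k, v)]) = pvKeys es ++ [k] := by
        rw [pvKeys_append, PySem.Set.add_of_not_mem hmem]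
      have hstep : pvStep rx (i, k, v) = (rx.1.insert k v, rx.2) := by
        simp [pvStep, hcont]
      rw [hstep]
      have hvnil : pvVals es k = [] := by simp [pvVals, hfilt]
      have hMk : pvMax (es ++ [(i,k,v)]) k = v := by
        rw [pvMax_append_self es (i,k,v) k rfl, if_pos hfilt]
      have hFk : pvFst (es ++ [(i,k,v)]) k = v := by
        rw [pvFst, pvVals_append, hvnil]; simp
      refine ⟨?_, ?_, hXnd, ?_, ?_, ?_⟩
      · rw [PySem.Dict.items_insert_of_not_contains _ _ hcont, hR, hkeys', List.map_append]
        congr 1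
        · apply List.map_congr_left
          intro a ha
          have hak : ((i,k,v) : PvEv).2.1 ≠ a := fun h => hmem ((show k = a from h) ▸ ha)
          rw [pvMax_other es (i,k,v) a hak]
        · simp [hMk]
      · intro k'
        by_cases hk' : k' = k
        · subst hk'
          constructor
          · intro hmm; exact absurd ((hXm k').mp hmm).1 hmem
          · rintro ⟨-, hlt⟩; rw [hFk, hMk] at hlt; omega
        · have hne : ((i,k,v) : PvEv).2.1 ≠ k' := fun h => hk' h.symm
          rw [hXm k', hkeys']
          rw [pvFst_other es _ _ hne, pvMax_other es _ _ hne]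
          simp [hk']
      · intro p hp
        have hpk : p.1 ∈ pvKeys es := ((hXm p.1).mp (List.mem_map_of_mem hp)).1
        have hne : ((i,k,v) : PvEv).2.1 ≠ p.1 := fun h => hmem ((show k = p.1 from h) ▸ hpk)
        rw [pvJ_other es _ _ hne]; exact hXv p hp
      · refine hXp.imp_of_mem ?_
        intro p q hp hq h
        rw [hstab p hp, hstab q hq]; exact h
      · intro p hp
        rw [hstab p hp, List.length_append]
        have := hXl p hp; simp; omega

-- invariant of B's first/improved fold
def pvInvB (es : List PvEv) (fi : PySem.Dict String Int × PySem.Set String) : Prop :=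
  fi.1.items = (pvKeys es).map (fun k => (k, pvFst es k)) ∧
  (∀ k, k ∈ fi.2 ↔ (k ∈ pvKeys es ∧ pvFst es k < pvMax es k)) ∧
  fi.2.Pairwise (fun a b => pvIp es a < pvIp es b) ∧
  (∀ k ∈ fi.2, pvIp es k < es.length)

theorem pvInvB_foldl (es : List PvEv) :
    pvInvB es (es.foldl pvStepB (PySem.Dict.empty, PySem.Set.empty)) := by
  induction es using List.reverseRecOn with
  | nil =>
    refine ⟨?_, ?_, ?_, ?_⟩ <;>
      simp [PySem.Dict.empty, PySem.Set.empty, pvKeys, PySem.List.dedup_eq_ofList,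
        PySem.Set.ofList_nil]
  | append_singleton es e ih =>
    obtain ⟨i, k, v⟩ := e
    obtain ⟨hF, hIm, hIp, hIl⟩ := ih
    rw [List.foldl_append, List.foldl_cons, List.foldl_nil]
    set fi := es.foldl pvStepB (PySem.Dict.empty, PySem.Set.empty) with hfi
    have hkeysF : fi.1.keys = pvKeys es := by
      rw [PySem.Dict.keys, hF, List.map_map]
      exact List.map_id _
    have hgetD : ∀ k' ∈ pvKeys es, fi.1.getD k' 0 = pvFst es k' := by
      intro k' hk'
      simp [PySem.Dict.getD, PySem.Dict.get?, hF, find?_pair_map _ _ _ hk']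
    have hcontF : (fi.1.contains k = true) ↔ k ∈ pvKeys es := by
      rw [PySem.Dict.contains_iff_mem_keys, hkeysF]
    have hstab : ∀ k' ∈ fi.2, pvIp (es ++ [(i,k,v)]) k' = pvIp es k' := by
      intro k' hk'
      have hpk := (hIm k').mp hk'
      exact pvIp_append_stable es _ k' ((mem_pvKeys es k').mp hpk.1) (hIl k' hk')
    by_cases hmem : k ∈ pvKeys es
    · have hcont : fi.1.contains k = true := hcontF.mpr hmem
      have hfilt : pvFilt es k ≠ [] := (mem_pvKeys es k).mp hmem
      have hkeys' : pvKeys (es ++ [(i,k,v)]) = pvKeys es := by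
        rw [pvKeys_append, PySem.Set.add_of_mem hmem]
      have hFk : pvFst (es ++ [(i,k,v)]) k = pvFst es k := pvFst_append es _ k hfilt
      have hFle : pvFst es k ≤ pvMax es k := pvFst_le_pvMax es k hfilt
      have hFitems : fi.1.items = (pvKeys (es ++ [(i,k,v)])).map
          (fun k' => (k', pvFst (es ++ [(i,k,v)]) k')) := by
        rw [hF, hkeys']
        apply List.map_congr_left
        intro a ha
        by_cases hak : a = k
        · subst hak; rw [hFk]
        · have hne : ((i,k,v) : PvEv).2.1 ≠ a := fun h => hak ((show k = a from h).symm)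
          rw [pvFst_other es _ _ hne]
      have hMself := pvMax_append_self es (i,k,v) k rfl
      rw [if_neg hfilt] at hMself
      by_cases hgt : v > fi.1.getD k 0
      · have hgt' : pvFst es k < v := by rw [hgetD k hmem] at hgt; omega
        have hstep : pvStepB fi (i,k,v) = (fi.1, PySem.Set.add fi.2 k) := by
          simp [pvStepB, hcont, hgt]
        rw [hstep]
        have hMk : pvFst (es ++ [(i,k,v)]) k < pvMax (es ++ [(i,k,v)]) k := by
          rw [hFk, hMself]
          exact lt_of_lt_of_le hgt' (le_max_right _ _)
        by_cases hin : k ∈ fi.2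
        · rw [PySem.Set.add_of_mem hin]
          refine ⟨hFitems, ?_, ?_, ?_⟩
          · intro k'
            rw [hIm k', hkeys']
            by_cases hk' : k' = k
            · subst hk'
              have himp := ((hIm k').mp hin).2
              constructor
              · intro _; exact ⟨hmem, hMk⟩
              · intro _; exact ⟨hmem, himp⟩
            · have hne : ((i,k,v) : PvEv).2.1 ≠ k' := fun h => hk' h.symm
              rw [pvFst_other es _ _ hne, pvMax_other es _ _ hne]
          · refine hIp.imp_of_mem ?_
            intro a b ha hb h
            rw [hstab a ha, hstab b hb]; exact h
          · intro k' hk'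
            rw [hstab k' hk', List.length_append]
            have := hIl k' hk'; simp; omega
        · have hni : ¬ pvFst es k < pvMax es k := fun h => hin ((hIm k).mpr ⟨hmem, h⟩)
          have hIpk : pvIp (es ++ [(i,k,v)]) k = es.length :=
            pvIp_append_new es (i,k,v) k rfl hfilt hni hgt'
          rw [PySem.Set.add_of_not_mem hin]
          refine ⟨hFitems, ?_, ?_, ?_⟩
          · intro k'
            rw [hkeys']
            by_cases hk' : k' = k
            · subst hk'
              simp only [List.mem_append, List.mem_singleton]
              constructor
              · intro _; exact ⟨hmem, hMk⟩
              · intro _; simp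
            · have hne : ((i,k,v) : PvEv).2.1 ≠ k' := fun h => hk' h.symm
              rw [pvFst_other es _ _ hne, pvMax_other es _ _ hne]
              simp only [List.mem_append, List.mem_singleton]
              constructor
              · rintro (h | h)
                · exact (hIm k').mp h
                · exact absurd h hk'
              · intro h; exact Or.inl ((hIm k').mpr h)
          · rw [List.pairwise_append]
            refine ⟨hIp.imp_of_mem ?_, List.pairwise_singleton _ _, ?_⟩
            · intro a b ha hb h
              rw [hstab a ha, hstab b hb]; exact h
            · intro a ha b hb
              simp only [List.mem_singleton] at hb
              subst hb
              rw [hstab a ha, hIpk]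
              exact hIl a ha
          · intro k' hk'
            rcases List.mem_append.mp hk' with h | h
            · rw [hstab k' h, List.length_append]
              have := hIl k' h; simp; omega
            · simp only [List.mem_singleton] at h
              subst h
              rw [hIpk, List.length_append]; simp
      · have hle : v ≤ pvFst es k := by rw [hgetD k hmem] at hgt; omega
        have hstep : pvStepB fi (i,k,v) = fi := by
          simp [pvStepB, hcont, hgt]
        rw [hstep]
        have hMk : pvMax (es ++ [(i,k,v)]) k = pvMax es k := by
          rw [hMself]
          show max (pvMax es k) v = pvMax es k
          omega
        refine ⟨hFitems, ?_, ?_, ?_⟩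
        · intro k'
          rw [hIm k', hkeys']
          by_cases hk' : k' = k
          · subst hk'; rw [hFk, hMk]
          · have hne : ((i,k,v) : PvEv).2.1 ≠ k' := fun h => hk' h.symm
            rw [pvFst_other es _ _ hne, pvMax_other es _ _ hne]
        · refine hIp.imp_of_mem ?_
          intro a b ha hb h
          rw [hstab a ha, hstab b hb]; exact h
        · intro k' hk'
          rw [hstab k' hk', List.length_append]
          have := hIl k' hk'; simp; omega
    · have hcont : fi.1.contains k = false := by
        rw [← Bool.not_eq_true]; simp [hcontF, hmem]
      have hfilt : pvFilt es k = [] := by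
        by_contra hne; exact hmem ((mem_pvKeys es k).mpr hne)
      have hkeys' : pvKeys (es ++ [(i, k, v)]) = pvKeys es ++ [k] := by
        rw [pvKeys_append, PySem.Set.add_of_not_mem hmem]
      have hstep : pvStepB fi (i, k, v) = (fi.1.insert k v, fi.2) := by
        simp [pvStepB, hcont]
      rw [hstep]
      have hFk : pvFst (es ++ [(i,k,v)]) k = v := pvFst_append_new es (i,k,v) k rfl hfilt
      have hMk : pvMax (es ++ [(i,k,v)]) k = v := by
        rw [pvMax_append_self es (i,k,v) k rfl, if_pos hfilt]
      refine ⟨?_, ?_, ?_, ?_⟩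
      · rw [PySem.Dict.items_insert_of_not_contains _ _ hcont, hF, hkeys', List.map_append]
        congr 1
        · apply List.map_congr_left
          intro a ha
          have hak : ((i,k,v) : PvEv).2.1 ≠ a := fun h => hmem ((show k = a from h) ▸ ha)
          rw [pvFst_other es (i,k,v) a hak]
        · simp [hFk]
      · intro k'
        by_cases hk' : k' = k
        · subst hk'
          constructor
          · intro hmm; exact absurd ((hIm k').mp hmm).1 hmem
          · rintro ⟨-, hlt⟩; rw [hFk, hMk] at hlt; omega
        · have hne : ((i,k,v) : PvEv).2.1 ≠ k' := fun h => hk' h.symm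
          rw [hIm k', hkeys']
          rw [pvFst_other es _ _ hne, pvMax_other es _ _ hne]
          simp [hk']
      · refine hIp.imp_of_mem ?_
        intro a b ha hb h
        rw [hstab a ha, hstab b hb]; exact h
      · intro k' hk'
        rw [hstab k' hk', List.length_append]
        have := hIl k' hk'; simp; omega

-- two lists strictly increasing under f with the same members are equal
theorem pvSortedUnique {α : Type} (f : α → Nat) :
    ∀ (l1 l2 : List α), l1.Pairwise (fun a b => f a < f b) → l2.Pairwise (fun a b => f a < f b) →
      (∀ x, x ∈ l1 ↔ x ∈ l2) → l1 = l2 := by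
  intro l1
  induction l1 with
  | nil =>
    intro l2 _ _ hm
    cases l2 with
    | nil => rfl
    | cons b t2 => exact absurd ((hm b).mpr (by simp)) (by simp)
  | cons a t1 ih =>
    intro l2 h1 h2 hm
    cases l2 with
    | nil => exact absurd ((hm a).mp (by simp)) (by simp)
    | cons b t2 =>
      obtain ⟨ha1, ht1⟩ := List.pairwise_cons.mp h1
      obtain ⟨hb2, ht2⟩ := List.pairwise_cons.mp h2
      have hab : a = b := by
        by_contra hne
        have haIn : a ∈ b :: t2 := (hm a).mp (by simp)
        have hbIn : b ∈ a :: t1 := (hm b).mpr (by simp)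
        have ha2 : a ∈ t2 := by
          rcases List.mem_cons.mp haIn with h | h
          · exact absurd h hne
          · exact h
        have hb1 : b ∈ t1 := by
          rcases List.mem_cons.mp hbIn with h | h
          · exact absurd h.symm hne
          · exact h
        have := ha1 b hb1
        have := hb2 a ha2
        omega
      subst hab
      congr 1
      apply ih t2 ht1 ht2
      intro x
      constructor
      · intro hx
        rcases List.mem_cons.mp ((hm x).mp (by simp [hx])) with h | h
        · subst h; exact absurd (ha1 x hx) (by omega)
        · exact h
      · intro hx
        rcases List.mem_cons.mp ((hm x).mpr (by simp [hx])) with h | h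
        · subst h; exact absurd (hb2 x hx) (by omega)
        · exact h

theorem find?_filter_sub {α : Type} (l : List α) (p q : α → Bool)
    (h : ∀ x, p x = true → q x = true) : (l.filter q).find? p = l.find? p := by
  induction l with
  | nil => rfl
  | cons a t ih =>
    by_cases hp : p a = true
    · rw [List.filter_cons_of_pos (h a hp), List.find?_cons_of_pos hp, List.find?_cons_of_pos hp]
    · have hp' : ¬ p a = true := hp
      by_cases hq : q a = true
      · rw [List.filter_cons_of_pos hq, List.find?_cons_of_neg hp', List.find?_cons_of_neg hp', ih]
      · rw [List.filter_cons_of_neg hq, List.find?_cons_of_neg hp', ih]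

theorem pvOfList_append (l : List (String × Int)) (p : String × Int) :
    PySem.Dict.ofList (l ++ [p]) = (PySem.Dict.ofList l).insert p.1 p.2 := by
  simp [PySem.Dict.ofList, PySem.Dict.update, List.foldl_append]

theorem pvKeys_ofList_sub (l : List (String × Int)) (k : String)
    (h : k ∈ (PySem.Dict.ofList l).keys) : k ∈ l.map Prod.fst := by
  induction l using List.reverseRecOn with
  | nil => simp [PySem.Dict.ofList, PySem.Dict.update, PySem.Dict.empty, PySem.Dict.keys] at h
  | append_singleton l p ih =>
    rw [pvOfList_append] at h
    rcases (PySem.Dict.mem_keys_insert _ _ _ _).mp h with h1 | h1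
    · simp [h1]
    · have := ih h1
      simp only [List.map_append, List.mem_append]
      exact Or.inl this

theorem pvOfList_items_nodup (l : List (String × Int))
    (h : (l.map Prod.fst).Nodup) : (PySem.Dict.ofList l).items = l := by
  induction l using List.reverseRecOn with
  | nil => rfl
  | append_singleton l p ih =>
    rw [List.map_append] at h
    have hnd : (l.map Prod.fst).Nodup := (List.nodup_append.mp h).1
    have hnm : p.1 ∉ l.map Prod.fst := by
      intro hmm
      have hdisj := (List.nodup_append.mp h).2.2
      exact hdisj p.1 hmm p.1 (by simp) rfl
    have hcont : (PySem.Dict.ofList l).contains p.1 = false := by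
      rw [← Bool.not_eq_true, PySem.Dict.contains_iff_mem_keys]
      intro hk
      exact hnm (pvKeys_ofList_sub l p.1 hk)
    rw [pvOfList_append, PySem.Dict.items_insert_of_not_contains _ _ hcont, ih hnd]

theorem pvRen_foldl (xs : List (String × Int)) (r : PySem.Dict String Int)
    (hnd : (r.items.map Prod.fst).Nodup)
    (hmem : ∀ p ∈ xs, p.1 ∈ r.items.map Prod.fst)
    (hxnd : (xs.map Prod.fst).Nodup)
    (hfresh : ∀ p ∈ xs, pvName p.1 p.2 ∉ r.items.map Prod.fst)
    (hdst : (xs.map (fun p => pvName p.1 p.2)).Nodup) :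
    (xs.foldl pvRen r).items
      = r.items.filter (fun q => !(xs.map Prod.fst).contains q.1)
        ++ xs.map (fun p => (pvName p.1 p.2, r.getD p.1 0)) := by
  induction xs generalizing r with
  | nil => simp
  | cons x t ih =>
    rw [List.foldl_cons]
    have hx1 : x.1 ∈ r.items.map Prod.fst := hmem x (by simp)
    have hnm : pvName x.1 x.2 ∉ r.items.map Prod.fst := hfresh x (by simp)
    have hnmx : pvName x.1 x.2 ≠ x.1 := fun h => hnm (by rw [h]; exact hx1)
    have hcont : r.contains (pvName x.1 x.2) = false := by
      rw [← Bool.not_eq_true, PySem.Dict.contains_iff_mem_keys]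
      intro hk; exact hnm (by simpa [PySem.Dict.keys] using hk)
    have hritems : (pvRen r x).items
        = r.items.filter (fun p => !(p.1 == x.1)) ++ [(pvName x.1 x.2, r.getD x.1 0)] := by
      rw [pvRen, PySem.Dict.erase]
      simp only [PySem.Dict.items_insert_of_not_contains _ _ hcont]
      rw [List.filter_append]
      congr 1
      simp [hnmx]
    have hxfst : x.1 ∉ t.map Prod.fst := by
      have := hxnd; simp only [List.map_cons] at this
      exact (List.nodup_cons.mp this).1
    have hnmt : pvName x.1 x.2 ∉ t.map (fun p => pvName p.1 p.2) := by
      have := hdst; simp only [List.map_cons] at this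
      exact (List.nodup_cons.mp this).1
    have hgd : ∀ y, y ≠ x.1 → y ≠ pvName x.1 x.2 → (pvRen r x).getD y 0 = r.getD y 0 := by
      intro y hy1 hy2
      rw [PySem.Dict.getD, PySem.Dict.getD, PySem.Dict.get?, PySem.Dict.get?, hritems,
        List.find?_append, find?_filter_sub _ _ _ (by
          intro z hz
          simp only [beq_iff_eq] at hz
          simp [hz, hy1])]
      cases hf : r.items.find? (fun p => p.1 == y) with
      | some q => simp
      | none => simp [hy2.symm]
    have hsubfst : ∀ a, a ∈ (r.items.filter (fun p => !(p.1 == x.1))).map Prod.fst →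
        a ∈ r.items.map Prod.fst :=
      fun a ha => ((List.filter_sublist).map Prod.fst).subset ha
    have hmemfilt : ∀ a, a ∈ r.items.map Prod.fst → a ≠ x.1 →
        a ∈ (r.items.filter (fun p => !(p.1 == x.1))).map Prod.fst := by
      intro a ha hne
      obtain ⟨q, hq, rfl⟩ := List.mem_map.mp ha
      exact List.mem_map.mpr ⟨q, List.mem_filter.mpr ⟨hq, by simp [hne]⟩, rfl⟩
    have htsub : ∀ a, a ∈ t.map Prod.fst → a ∈ r.items.map Prod.fst := by
      intro a ha
      obtain ⟨q, hq, rfl⟩ := List.mem_map.mp ha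
      exact hmem q (by simp [hq])
    have hnmnt : pvName x.1 x.2 ∉ t.map Prod.fst := fun h => hnm (htsub _ h)
    have ihstep := ih (pvRen r x)
      (by
        rw [hritems, List.map_append, List.nodup_append]
        refine ⟨((List.filter_sublist).map Prod.fst).nodup hnd, by simp, ?_⟩
        intro a ha b hb
        simp only [List.map_cons, List.map_nil, List.mem_cons, List.not_mem_nil, or_false] at hb
        subst hb
        exact fun h => hnm (h ▸ hsubfst a ha))
      (by
        intro p hp
        rw [hritems, List.map_append, List.mem_append]
        left
        have hpx : p.1 ≠ x.1 := by
          intro h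
          exact hxfst (h ▸ List.mem_map_of_mem hp)
        exact hmemfilt p.1 (hmem p (by simp [hp])) hpx)
      (by
        have := hxnd; simp only [List.map_cons] at this
        exact (List.nodup_cons.mp this).2)
      (by
        intro p hp
        rw [hritems, List.map_append, List.mem_append]
        rintro (h | h)
        · exact hfresh p (by simp [hp]) (hsubfst _ h)
        · simp only [List.map_cons, List.map_nil, List.mem_cons, List.not_mem_nil, or_false] at h
          exact hnmt (h ▸ List.mem_map_of_mem hp))
      (by
        have := hdst; simp only [List.map_cons] at this
        exact (List.nodup_cons.mp this).2)
    rw [ihstep, hritems]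
    rw [List.filter_append]
    have hkeep : (List.filter (fun q => !(List.map Prod.fst t).contains q.1)
        [(pvName x.1 x.2, r.getD x.1 0)]) = [(pvName x.1 x.2, r.getD x.1 0)] := by
      simp only [List.filter_cons, List.filter_nil]
      have : ((List.map Prod.fst t).contains (pvName x.1 x.2)) = false := by
        cases hc : ((List.map Prod.fst t).contains (pvName x.1 x.2))
        · rfl
        · exact absurd (by simpa using hc) hnmnt
      rw [this]
      rfl
    rw [hkeep, List.filter_filter]
    have hpred : ∀ q : String × Int,
        ((!(List.map Prod.fst t).contains q.1) && !(q.1 == x.1))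
          = !((List.map Prod.fst (x :: t)).contains q.1) := by
      intro q
      simp only [List.map_cons, List.contains_cons]
      simp only [Bool.not_or, Bool.and_comm]
    have hmapt : List.map (fun p => (pvName p.1 p.2, (pvRen r x).getD p.1 0)) t
        = List.map (fun p => (pvName p.1 p.2, r.getD p.1 0)) t := by
      apply List.map_congr_left
      intro p hp
      have hpx : p.1 ≠ x.1 := by
        intro h
        exact hxfst (h ▸ List.mem_map_of_mem hp)
      have hpnm : p.1 ≠ pvName x.1 x.2 := by
        intro h
        exact hnm (h ▸ htsub _ (List.mem_map_of_mem hp))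
      rw [hgd p.1 hpx hpnm]
    rw [hmapt]
    simp only [List.map_cons]
    rw [List.filter_congr (fun q _ => hpred q)]
    simp

theorem pvEvents_key_mem (dl : List (List (String × Int))) (e : PvEv) (he : e ∈ pvEvents dl) :
    e.2.1 ∈ (dl.flatten).map Prod.fst := by
  rw [pvEvents, List.mem_flatMap] at he
  obtain ⟨p, hp, he2⟩ := he
  obtain ⟨kv, hkv, rfl⟩ := List.mem_map.mp he2
  have hd : p.2 ∈ dl := by
    rw [PySem.List.mem_enumerate_iff] at hp
    obtain ⟨t, ht, rfl⟩ := hp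
    exact List.getElem_mem ht
  have hk : kv.1 ∈ p.2.map Prod.fst :=
    pvKeys_ofList_sub p.2 kv.1 (by simpa [PySem.Dict.keys] using List.mem_map_of_mem (f := Prod.fst) hkv)
  obtain ⟨q, hq, hqe⟩ := List.mem_map.mp hk
  exact List.mem_map.mpr ⟨q, List.mem_flatten.mpr ⟨p.2, hd, hq⟩, hqe⟩

theorem pvEvents_idx (dl : List (List (String × Int))) (e : PvEv) (he : e ∈ pvEvents dl) :
    ∃ t ∈ List.range dl.length, e.1 = (t : Int) + 1 := by
  rw [pvEvents, List.mem_flatMap] at he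
  obtain ⟨p, hp, he2⟩ := he
  obtain ⟨kv, hkv, rfl⟩ := List.mem_map.mp he2
  rw [PySem.List.mem_enumerate_iff] at hp
  obtain ⟨t, ht, rfl⟩ := hp
  exact ⟨t, List.mem_range.mpr ht, by simp⟩

theorem pvJ_mem (es : List PvEv) (k : String) (h : pvFilt es k ≠ []) :
    ∃ e ∈ es, e.2.1 = k ∧ pvJ es k = e.1 := by
  have hex : ∃ p ∈ pvOcc es k, (p.2 == pvMax es k) = true := by
    have := pvMax_mem_vals es k h
    simp only [pvVals, List.mem_map] at this
    obtain ⟨ev, hev, hv⟩ := this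
    exact ⟨(ev.1, ev.2.2), List.mem_map.mpr ⟨ev, hev, rfl⟩, by simp [hv]⟩
  cases hf : (pvOcc es k).find? (fun p => p.2 == pvMax es k) with
  | none =>
    rw [List.find?_eq_none] at hf
    obtain ⟨p, hp, hp2⟩ := hex
    exact absurd hp2 (by simp [hf p hp])
  | some q =>
    have hq := List.mem_of_find?_eq_some hf
    simp only [pvOcc, List.mem_map] at hq
    obtain ⟨ev, hev, rfl⟩ := hq
    refine ⟨ev, List.mem_of_mem_filter hev, ?_, ?_⟩
    · have := List.of_mem_filter hev
      simpa using this
    · rw [pvJ, hf]; rfl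

theorem pvMraw (es : List PvEv) (k : String) (h : pvFilt es k ≠ []) :
    (PySem.List.max? ((pvOcc es k).map (fun p => p.2)) (fun v => v)).getD 0 = pvMax es k := by
  have hvals : (pvOcc es k).map (fun p => p.2) = pvVals es k := by
    rw [pvOcc, pvVals, List.map_map]; rfl
  rw [hvals]
  cases hl : pvVals es k with
  | nil => exact absurd (by simpa [pvVals] using hl) (by simpa [pvVals] using h)
  | cons a t => rw [PySem.List.max?_id_cons, pvMax, hl, pvMaxL]; rfl

theorem result_eq (dl : List (List (String × Int))) :
    result dl =
      ((((pvEvents dl).foldl pvStep (PySem.Dict.empty, PySem.Dict.empty)).2.items.foldl pvRen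
          ((pvEvents dl).foldl pvStep (PySem.Dict.empty, PySem.Dict.empty)).1).items,
        ((pvEvents dl).foldl pvStep (PySem.Dict.empty, PySem.Dict.empty)).2.items) := by
  simp only [result, pvEvents, List.foldl_flatMap, List.foldl_map, pvStep]
  rfl

def pvGroups (es : List PvEv) : PySem.Dict String (List (Int × Int)) :=
  es.foldl (fun g e => g.modify e.2.1 [] (fun occ => occ ++ [(e.1, e.2.2)])) PySem.Dict.empty

theorem pvGroups_getD (es : List PvEv) (k : String) :
    (pvGroups es).getD k [] = pvOcc es k := by
  have h1 : pvGroups es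
      = (es.map (fun e => (e.2.1, (e.1, e.2.2)))).foldl
          (fun (d : PySem.Dict String (List (Int × Int))) p => d.modify p.1 [] (fun l => l ++ [p.2]))
          PySem.Dict.empty := by
    rw [pvGroups, List.foldl_map]
  rw [h1, PySem.Dict.getD_foldl_modify_append, PySem.Dict.getD_empty, List.nil_append,
    List.filter_map, List.map_map]
  rfl

def pvRStep (ri : PySem.Dict String Int × PySem.Dict String Int) (k : String)
    (g : PySem.Dict String (List (Int × Int))) :
    PySem.Dict String Int × PySem.Dict String Int :=
  let occ := g.getD k []
  let m := (PySem.List.max? (occ.map (fun p => p.2)) (fun v => v)).getD 0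
  let j := ((occ.find? (fun p => p.2 == m)).map (fun p => p.1)).getD 0
  (ri.1.insert (pvName k j) m, ri.2.insert k j)

theorem result_alt_eq (dl : List (List (String × Int))) :
    result_alt dl =
      (let fi := (pvEvents dl).foldl pvStepB (PySem.Dict.empty, PySem.Set.empty)
       let res0 := PySem.Dict.ofList (fi.1.items.filter (fun kv => !PySem.Set.contains fi.2 kv.1))
       let ri := fi.2.foldl (fun ri k => pvRStep ri k (pvGroups (pvEvents dl))) (res0, PySem.Dict.empty)
       (ri.1.items, ri.2.items)) := rfl

theorem pvMain (dl : List (List (String × Int)))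
    (hp1 : ∀ k ∈ PySem.List.dedup ((dl.flatten).map (fun p => p.1)),
       ∀ i ∈ List.range dl.length,
         pvName k ((i : Int) + 1) ∉ PySem.List.dedup ((dl.flatten).map (fun p => p.1)))
    (hp2 : ∀ k1 ∈ PySem.List.dedup ((dl.flatten).map (fun p => p.1)),
       ∀ k2 ∈ PySem.List.dedup ((dl.flatten).map (fun p => p.1)), k1 ≠ k2 →
         ∀ i1 ∈ List.range dl.length, ∀ i2 ∈ List.range dl.length,
           pvName k1 ((i1 : Int) + 1) ≠ pvName k2 ((i2 : Int) + 1)) :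
    result dl = result_alt dl := by
  obtain ⟨hR, hXm, hXnd, hXv, hXp, hXl⟩ := pvInv_foldl (pvEvents dl)
  obtain ⟨hF, hIm, hIp, hIl⟩ := pvInvB_foldl (pvEvents dl)
  set es := pvEvents dl with hes
  set rx := es.foldl pvStep (PySem.Dict.empty, PySem.Dict.empty) with hrx
  set fi := es.foldl pvStepB (PySem.Dict.empty, PySem.Set.empty) with hfi
  have hks : ∀ k ∈ pvKeys es, k ∈ PySem.List.dedup ((dl.flatten).map (fun p => p.1)) := by
    intro k hk
    rw [pvKeys, PySem.List.dedup_eq_ofList, PySem.Set.mem_ofList] at hk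
    obtain ⟨e, he, rfl⟩ := List.mem_map.mp hk
    rw [PySem.List.dedup_eq_ofList, PySem.Set.mem_ofList]
    exact pvEvents_key_mem dl e he
  have hXK : ∀ p ∈ rx.2.items, p.1 ∈ pvKeys es :=
    fun p hp => ((hXm p.1).mp (List.mem_map_of_mem hp)).1
  have hXidx : ∀ p ∈ rx.2.items, ∃ t ∈ List.range dl.length, p.2 = (t : Int) + 1 := by
    intro p hp
    have hfilt : pvFilt es p.1 ≠ [] := (mem_pvKeys _ p.1).mp (hXK p hp)
    obtain ⟨e, he, hek, hej⟩ := pvJ_mem es p.1 hfilt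
    obtain ⟨t, ht, hei⟩ := pvEvents_idx dl e he
    exact ⟨t, ht, by rw [hXv p hp, hej, hei]⟩
  have hgetD : ∀ k ∈ pvKeys es, rx.1.getD k 0 = pvMax es k := by
    intro k hk
    simp [PySem.Dict.getD, PySem.Dict.get?, hR, find?_pair_map _ _ _ hk]
  have hfreshX : ∀ p ∈ rx.2.items, pvName p.1 p.2 ∉ pvKeys es := by
    intro p hp hmm
    obtain ⟨t, ht, hpt⟩ := hXidx p hp
    exact hp1 p.1 (hks _ (hXK p hp)) t ht (by rw [← hpt]; exact hks _ hmm)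
  have hXlnd : rx.2.items.Nodup := hXnd.of_map
  have hdstX : (rx.2.items.map (fun p => pvName p.1 p.2)).Nodup := by
    refine List.Nodup.map_on ?_ hXlnd
    intro p hp q hq heq
    by_cases hfst : p.1 = q.1
    · have h2 : p.2 = q.2 := by rw [hXv p hp, hXv q hq, hfst]
      exact Prod.ext hfst h2
    · obtain ⟨t1, ht1, hq1⟩ := hXidx p hp
      obtain ⟨t2, ht2, hq2⟩ := hXidx q hq
      exact absurd (by rw [← hq1, ← hq2]; exact heq)
        (hp2 p.1 (hks _ (hXK p hp)) q.1 (hks _ (hXK q hq)) hfst t1 ht1 t2 ht2)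
  -- improved = the first-components of A's indx
  have hImp : fi.2 = rx.2.items.map Prod.fst := by
    apply pvSortedUnique (pvIp es) _ _ hIp
    · rw [List.pairwise_map]; exact hXp
    · intro x
      rw [hIm x, hXm x]
  -- A's indx items are exactly improved keys paired with pvJ
  have hXitems : rx.2.items = fi.2.map (fun k => (k, pvJ es k)) := by
    rw [hImp, List.map_map]
    symm
    calc rx.2.items.map ((fun k => (k, pvJ es k)) ∘ Prod.fst)
        = rx.2.items.map (fun p => p) := by
          apply List.map_congr_left
          intro p hp
          simp only [Function.comp_apply]
          have := (hXv p hp).symm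
          calc ((p.1, pvJ es p.1) : String × Int) = (p.1, p.2) := by rw [this]
            _ = p := rfl
      _ = rx.2.items := List.map_id' _
  have hImem : ∀ k ∈ fi.2, k ∈ pvKeys es ∧ pvFst es k < pvMax es k := fun k hk => (hIm k).mp hk
  have hIfilt : ∀ k ∈ fi.2, pvFilt es k ≠ [] :=
    fun k hk => (mem_pvKeys es k).mp (hImem k hk).1
  have hInd : fi.2.Nodup := by rw [hImp]; exact hXnd
  -- A's side, via pvRen_foldl
  rw [result_eq dl, ← hes, ← hrx]
  have hRfst : rx.1.items.map Prod.fst = pvKeys es := by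
    rw [hR, List.map_map]; exact List.map_id _
  rw [pvRen_foldl _ _ (by rw [hRfst]; exact pvKeys_nodup es)
      (fun p hp => by rw [hRfst]; exact hXK p hp) hXnd
      (fun p hp => by rw [hRfst]; exact hfreshX p hp) hdstX]
  -- B's side
  rw [result_alt_eq dl]
  simp only [← hes, ← hfi]
  -- res0 = A's kept (plain) entries
  have hcontI : ∀ a, PySem.Set.contains fi.2 a = (rx.2.items.map Prod.fst).contains a := by
    intro a
    rw [PySem.Set.contains_eq_listContains, hImp]
  have hres0 : (PySem.Dict.ofList (fi.1.items.filter (fun kv => !PySem.Set.contains fi.2 kv.1))).items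
      = rx.1.items.filter (fun q => !(rx.2.items.map Prod.fst).contains q.1) := by
    have hfeq : fi.1.items.filter (fun kv => !PySem.Set.contains fi.2 kv.1)
        = rx.1.items.filter (fun q => !(rx.2.items.map Prod.fst).contains q.1) := by
      rw [hF, hR, List.filter_map, List.filter_map]
      have hsame : ∀ k ∈ pvKeys es,
          ((fun (kv : String × Int) => !PySem.Set.contains fi.2 kv.1) ∘ fun k => (k, pvFst es k)) k
            = ((fun (q : String × Int) => !(rx.2.items.map Prod.fst).contains q.1) ∘ fun k => (k, pvMax es k)) k := by
        intro k hk
        simp only [Function.comp_apply]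
        rw [hcontI]
      rw [List.filter_congr hsame]
      apply List.map_congr_left
      intro k hk
      have hkk := List.mem_of_mem_filter hk
      have hnimp : k ∉ fi.2 := by
        have hthis := List.of_mem_filter hk
        simp only [Function.comp_apply, Bool.not_eq_true'] at hthis
        intro hcmem
        have hc : fi.2.contains k = true := by
          rw [PySem.Set.contains_iff]; exact hcmem
        rw [hcontI, hthis] at hc
        exact Bool.false_ne_true hc
      have hni : ¬ pvFst es k < pvMax es k := fun h => hnimp ((hIm k).mpr ⟨hkk, h⟩)
      rw [pvFst_eq_pvMax es k ((mem_pvKeys es k).mp hkk) hni]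
    rw [hfeq]
    apply pvOfList_items_nodup
    have hsubl : ((rx.1.items.filter (fun q => !(rx.2.items.map Prod.fst).contains q.1)).map Prod.fst).Sublist
        (rx.1.items.map Prod.fst) := List.filter_sublist.map Prod.fst
    refine hsubl.nodup ?_
    rw [hRfst]
    exact pvKeys_nodup es
  -- the reduce loop: rewrite each step to pvMax/pvJ, then split and append
  have hstepeq : ∀ (ri : PySem.Dict String Int × PySem.Dict String Int) (k : String), k ∈ fi.2 →
      pvRStep ri k (pvGroups es) = (ri.1.insert (pvName k (pvJ es k)) (pvMax es k), ri.2.insert k (pvJ es k)) := by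
    intro ri k hk
    have hocc := pvGroups_getD es k
    have hm := pvMraw es k (hIfilt k hk)
    rw [pvRStep]
    simp only [hocc, hm]
    rfl
  have hfold : fi.2.foldl (fun ri k => pvRStep ri k (pvGroups es))
        (PySem.Dict.ofList (fi.1.items.filter (fun kv => !PySem.Set.contains fi.2 kv.1)), PySem.Dict.empty)
      = fi.2.foldl (fun ri k => (ri.1.insert (pvName k (pvJ es k)) (pvMax es k), ri.2.insert k (pvJ es k)))
        (PySem.Dict.ofList (fi.1.items.filter (fun kv => !PySem.Set.contains fi.2 kv.1)), PySem.Dict.empty) := by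
    apply PySem.List.foldl_congr_mem
    intro ri k hk
    exact hstepeq ri k hk
  rw [hfold, PySem.List.foldl_prod_mk
    (f := fun r k => PySem.Dict.insert r (pvName k (pvJ es k)) (pvMax es k))
    (g := fun d k => PySem.Dict.insert d k (pvJ es k))]
  -- the two insert loops append fresh keys
  have hfreshI : ∀ k ∈ fi.2, pvName k (pvJ es k) ∉ pvKeys es := by
    intro k hk
    have hkX : (k, pvJ es k) ∈ rx.2.items := by
      rw [hXitems]; exact List.mem_map.mpr ⟨k, hk, rfl⟩
    exact hfreshX (k, pvJ es k) hkX
  have hnamesI : (fi.2.map (fun k => pvName k (pvJ es k))).Nodup := by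
    have : fi.2.map (fun k => pvName k (pvJ es k))
        = rx.2.items.map (fun p => pvName p.1 p.2) := by
      rw [hXitems, List.map_map]; rfl
    rw [this]; exact hdstX
  have h1 : (fi.2.foldl (fun r k => PySem.Dict.insert r (pvName k (pvJ es k)) (pvMax es k))
        (PySem.Dict.ofList (fi.1.items.filter (fun kv => !PySem.Set.contains fi.2 kv.1)))).items
      = (PySem.Dict.ofList (fi.1.items.filter (fun kv => !PySem.Set.contains fi.2 kv.1))).items
        ++ fi.2.map (fun k => (pvName k (pvJ es k), pvMax es k)) := by
    apply PySem.Dict.items_foldl_insert_fresh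
    · intro k hk
      rw [← Bool.not_eq_true, PySem.Dict.contains_iff_mem_keys]
      intro hmm
      have hsub := pvKeys_ofList_sub _ _ hmm
      have hsub2 : pvName k (pvJ es k) ∈ fi.1.items.map Prod.fst :=
        (List.filter_sublist.map Prod.fst).subset hsub
      have hinK : pvName k (pvJ es k) ∈ pvKeys es := by
        have hFfst : fi.1.items.map Prod.fst = pvKeys es := by
          rw [hF, List.map_map]; exact List.map_id _
        rwa [hFfst] at hsub2
      exact hfreshI k hk hinK
    · exact hnamesI
  have h2 : (fi.2.foldl (fun d k => PySem.Dict.insert d k (pvJ es k)) PySem.Dict.empty).items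
      = (PySem.Dict.empty : PySem.Dict String Int).items ++ fi.2.map (fun k => (k, pvJ es k)) := by
    apply PySem.Dict.items_foldl_insert_fresh (k := fun a => a) (v := fun a => pvJ es a)
    · intro a _
      exact PySem.Dict.contains_empty a
    · simpa using hInd
  rw [h1, h2, hres0]
  have hrenA : rx.2.items.map (fun p => (pvName p.1 p.2, rx.1.getD p.1 0))
      = fi.2.map (fun k => (pvName k (pvJ es k), pvMax es k)) := by
    rw [hXitems, List.map_map]
    apply List.map_congr_left
    intro k hk
    simp only [Function.comp_apply]
    rw [hgetD k (hImem k hk).1]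
  rw [hrenA, hXitems]
  simp [PySem.Dict.empty]

-- ===== VERDICT (by name: the statement is the Claim_ definition above) =====
theorem result_spec : Claim_equal_result := by
  intro dl _ hpre
  unfold Spec_result
  exact pvMain dl hpre.1 hpre.2
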